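-- pv_equiv track=rewrite | github.com/abdoljh/SROrchestrator | openalex_utils.py | format_openalex_authors
-- ===== SOURCE A (Python) =====
-- def format_openalex_authors(authorships):
--     """Formats OpenAlex authorship objects into IEEE 'I. Surname'."""
--     if not authorships:
--         return "Unknown Author"
--
--     formatted = []
--     for auth in authorships:
--         display_name = auth.get('author', {}).get('display_name', '')
--         parts = display_name.split()
--         if len(parts) > 1:
--             formatted.append(f"{parts[0][0]}. {' '.join(parts[1:])}")
--         else:
--             formatted.append(display_name if display_name else "Unknown")
--
--     if len(formatted) >= 3:
--         return f"{formatted[0]} et al."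
--     elif len(formatted) == 2:
--         return f"{formatted[0]} and {formatted[1]}"
--     return formatted[0]
-- ===== SOURCE B (Python) =====
-- def _name(auth):
--     return auth.get('author', {}).get('display_name', '')
--
--
-- def _ieee(name):
--     # One streaming pass over the characters: no split/join, no word list.
--     # Builds the abbreviated tail directly while counting word starts.
--     tail = []
--     first_initial = None
--     words = 0
--     prev_space = True
--     for ch in name:
--         sp = ch.isspace()
--         if prev_space and not sp:
--             words += 1
--             if words == 1:
--                 first_initial = ch
--             elif words > 2:
--                 tail.append(' ')
--         if not sp and words >= 2:
--             tail.append(ch)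
--         prev_space = sp
--     if words > 1:
--         return f"{first_initial}. {''.join(tail)}"
--     return name if name else "Unknown"
--
--
-- def format_openalex_authors(authorships):
--     n = len(authorships)
--     if n == 0:
--         return "Unknown Author"
--     if n > 2:
--         return f"{_ieee(_name(authorships[0]))} et al."
--     return " and ".join(_ieee(_name(a)) for a in authorships)
-- ===== Notes on version B (the rewrite author's own statement) =====
-- stated objective: alternative
-- what changed: B replaces A's per-author split/slice/join word-list formatting by a single streaming character scan that counts word starts, captures the first initial and builds the abbreviated tail in flight, and replaces A's format-all-then-branch-on-length selection by an early length branch plus a ' and '-join over the kept authors.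
import Mathlib
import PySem

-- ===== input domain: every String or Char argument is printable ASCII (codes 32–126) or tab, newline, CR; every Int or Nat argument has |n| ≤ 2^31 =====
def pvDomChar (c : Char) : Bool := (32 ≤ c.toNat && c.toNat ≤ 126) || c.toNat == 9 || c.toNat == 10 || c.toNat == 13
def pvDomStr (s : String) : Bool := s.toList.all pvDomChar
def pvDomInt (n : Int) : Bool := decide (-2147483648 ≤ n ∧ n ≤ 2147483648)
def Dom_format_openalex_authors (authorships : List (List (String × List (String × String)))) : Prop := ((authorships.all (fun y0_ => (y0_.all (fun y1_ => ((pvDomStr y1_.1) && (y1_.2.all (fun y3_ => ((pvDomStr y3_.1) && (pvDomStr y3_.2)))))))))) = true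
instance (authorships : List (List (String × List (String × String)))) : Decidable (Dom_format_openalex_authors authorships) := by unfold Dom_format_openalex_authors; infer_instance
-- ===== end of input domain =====

-- B replaces A's split/slice/join word-list formatting by a single streaming character scan
-- per author and A's length-branch selection by a " and "-join over the kept authors (objective: alternative).

-- ===== PORT A =====
-- literal transliteration of A: build the full `formatted` list, then branch on its length.
-- parts[0][0] never raises (split() tokens are nonempty), so the `.getD` defaults are unreachable.
def format_openalex_authors (authorships : List (List (String × List (String × String)))) : String :=
  if authorships = [] then "Unknown Author"
  else
    let formatted := authorships.foldl (fun acc auth =>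
      let display_name := (PySem.Dict.mk ((PySem.Dict.mk auth).getD "author" [])).getD "display_name" ""
      let parts := PySem.Str.split₀ display_name
      if parts.length > 1 then
        acc ++ [String.ofList [(PySem.Str.pyGet? (PySem.List.pyGetD parts 0 "") 0).getD ' '] ++ ". " ++
                PySem.Str.join " " (PySem.List.slice parts (some 1) none)]
      else
        acc ++ [if display_name ≠ "" then display_name else "Unknown"]) []
    if formatted.length ≥ 3 then PySem.List.pyGetD formatted 0 "" ++ " et al."
    else if formatted.length = 2 then
      PySem.List.pyGetD formatted 0 "" ++ " and " ++ PySem.List.pyGetD formatted 1 ""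
    else PySem.List.pyGetD formatted 0 ""

-- ===== PORT B =====
-- helper _name of Source B
def pvName (auth : List (String × List (String × String))) : String :=
  (PySem.Dict.mk ((PySem.Dict.mk auth).getD "author" [])).getD "display_name" ""

-- loop body of _ieee's streaming scan: state (tail, first_initial, words, prev_space)
def pvStep (st : List Char × Option Char × Nat × Bool) (ch : Char) :
    List Char × Option Char × Nat × Bool :=
  let sp := PySem.Chars.isspace ch
  let (tail, first, words, prev) := st
  let (words, first, tail) :=
    if prev && !sp then
      (words + 1,
       if words + 1 = 1 then some ch else first,
       if words + 1 > 2 then tail ++ [' '] else tail)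
    else (words, first, tail)
  let tail := if !sp && words ≥ 2 then tail ++ [ch] else tail
  (tail, first, words, sp)

-- helper _ieee of Source B: one scan over the characters (first_initial = None is unreachable when words > 1)
def pvIeee (name : String) : String :=
  let st := name.toList.foldl pvStep ([], none, 0, true)
  let (tail, first, words, _) := st
  if words > 1 then String.ofList ([first.getD ' '] ++ ('.' :: ' ' :: tail))
  else if name ≠ "" then name else "Unknown"

def format_openalex_authors_alt (authorships : List (List (String × List (String × String)))) : String :=
  if authorships.length = 0 then "Unknown Author"
  else if authorships.length > 2 then
    pvIeee (pvName (PySem.List.pyGetD authorships 0 [])) ++ " et al."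
  else PySem.Str.join " and " (authorships.map (fun a => pvIeee (pvName a)))

-- ===== PRECONDITION & SPEC =====
def Spec_format_openalex_authors (authorships : List (List (String × List (String × String)))) (out : String) : Prop := out = format_openalex_authors_alt authorships
instance (authorships : List (List (String × List (String × String)))) (out : String) : Decidable (Spec_format_openalex_authors authorships out) := by unfold Spec_format_openalex_authors; infer_instance

-- ===== CLAIM (what is proved, stated in full; the proofs are below) =====
def Claim_equal_format_openalex_authors : Prop := ∀ (authorships : List (List (String × List (String × String)))), Dom_format_openalex_authors authorships → Spec_format_openalex_authors authorships (format_openalex_authors authorships)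

-- ===== LEMMAS AND PROOFS (verdict theorem at the bottom) =====

-- the value A's loop appends for one authorship
def pvF (auth : List (String × List (String × String))) : String :=
  let display_name := pvName auth
  let parts := PySem.Str.split₀ display_name
  if parts.length > 1 then
    String.ofList [(PySem.Str.pyGet? (PySem.List.pyGetD parts 0 "") 0).getD ' '] ++ ". " ++
      PySem.Str.join " " (PySem.List.slice parts (some 1) none)
  else if display_name ≠ "" then display_name else "Unknown"

theorem pvFoldl_eq (l : List (List (String × List (String × String))))
    (acc : List String) :
    l.foldl (fun acc auth =>
      let display_name := (PySem.Dict.mk ((PySem.Dict.mk auth).getD "author" [])).getD "display_name" ""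
      let parts := PySem.Str.split₀ display_name
      if parts.length > 1 then
        acc ++ [String.ofList [(PySem.Str.pyGet? (PySem.List.pyGetD parts 0 "") 0).getD ' '] ++ ". " ++
                PySem.Str.join " " (PySem.List.slice parts (some 1) none)]
      else
        acc ++ [if display_name ≠ "" then display_name else "Unknown"]) acc
    = acc ++ l.map pvF := by
  induction l generalizing acc with
  | nil => simp
  | cons a t ih =>
    simp only [List.foldl_cons, List.map_cons, ih]
    by_cases h : (PySem.Str.split₀ ((PySem.Dict.mk ((PySem.Dict.mk a).getD "author" [])).getD "display_name" "")).length > 1 <;>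
      simp [pvF, pvName, h]

-- word list a partial scan state describes: finished words plus the current partial word
def pvWordsOf (cur : List Char) (acc : List (List Char)) : List (List Char) :=
  acc.reverse ++ (if cur.isEmpty then [] else [cur.reverse])

-- the scan state determined by a word list (last component = prev_space flag)
def pvView (W : List (List Char)) (b : Bool) : List Char × Option Char × Nat × Bool :=
  (PySem.Chars.join [' '] W.tail, W.head?.bind List.head?, W.length, b)

theorem pvJoin_append_singleton (s : List Char) (l : List (List Char)) (x : List Char)
    (h : l ≠ []) :
    PySem.Chars.join s (l ++ [x]) = PySem.Chars.join s l ++ s ++ x := by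
  induction l with
  | nil => exact absurd rfl h
  | cons a t ih =>
    cases t with
    | nil => simp [PySem.Chars.join, List.intercalate]
    | cons b t' =>
      have := ih (by simp)
      simp only [PySem.Chars.join, List.intercalate] at this ⊢
      simp_all [List.intersperse, List.append_assoc]

-- the streaming scan computes exactly the view of split₀'s word list
set_option maxRecDepth 4096 in
theorem pvScan_go (cs : List Char) : ∀ (cur : List Char) (acc : List (List Char)),
    ∃ b, List.foldl pvStep (pvView (pvWordsOf cur acc) cur.isEmpty) cs
        = pvView (PySem.Chars.split₀.go cs cur acc) b := by
  induction cs with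
  | nil =>
    intro cur acc
    refine ⟨cur.isEmpty, ?_⟩
    unfold PySem.Chars.split₀.go pvWordsOf
    cases cur <;> simp
  | cons c rest ih =>
    intro cur acc
    by_cases hsp : PySem.Chars.isspace c = true
    · -- space: close the current word (if any); tail/first/words unchanged
      have hstep : pvStep (pvView (pvWordsOf cur acc) cur.isEmpty) c
          = pvView (pvWordsOf [] (if cur.isEmpty then acc else cur.reverse :: acc)) true := by
        cases cur <;> simp [pvStep, pvView, pvWordsOf, hsp]
      rw [List.foldl_cons, hstep]
      unfold PySem.Chars.split₀.go
      rcases hcur : cur with _ | ⟨d, ds⟩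
      · simpa [hsp] using ih [] acc
      · simpa [hsp] using ih [] (cur.reverse :: acc) |>.imp (fun b hb => by
          simpa [hcur] using hb)
    · -- non-space: extend or start a word
      have hstep : pvStep (pvView (pvWordsOf cur acc) cur.isEmpty) c
          = pvView (pvWordsOf (c :: cur) acc) false := by
        rcases cur with _ | ⟨d, ds⟩
        · -- new word starts
          rcases acc with _ | ⟨w, ws⟩
          · simp [pvStep, pvView, pvWordsOf, hsp, PySem.Chars.join]
          · rcases hws : ws.reverse with _ | ⟨v, vs⟩
            · simp [pvStep, pvView, pvWordsOf, hsp, hws, PySem.Chars.join, List.intercalate]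
            · have hj : PySem.Chars.join [' '] (vs ++ [w, [c]])
                  = PySem.Chars.join [' '] (vs ++ [w]) ++ [' ', c] := by
                rw [show vs ++ [w, [c]] = (vs ++ [w]) ++ [[c]] by simp,
                  pvJoin_append_singleton [' '] (vs ++ [w]) [c] (by simp)]
                simp
              simp [pvStep, pvView, pvWordsOf, hsp, hws, hj, List.append_assoc]
        · -- extend the current word
          rcases acc with _ | ⟨w, ws⟩
          · simp [pvStep, pvView, pvWordsOf, hsp, PySem.Chars.join]
          · rcases hws : ws.reverse with _ | ⟨v, vs⟩
            · simp [pvStep, pvView, pvWordsOf, hsp, hws, PySem.Chars.join, List.intercalate]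
            · have hj : PySem.Chars.join [' '] (vs ++ [w, ds.reverse ++ [d, c]])
                  = PySem.Chars.join [' '] (vs ++ [w, ds.reverse ++ [d]]) ++ [c] := by
                rw [show vs ++ [w, ds.reverse ++ [d, c]] = (vs ++ [w]) ++ [ds.reverse ++ [d, c]] by simp,
                  show vs ++ [w, ds.reverse ++ [d]] = (vs ++ [w]) ++ [ds.reverse ++ [d]] by simp,
                  pvJoin_append_singleton [' '] (vs ++ [w]) _ (by simp),
                  pvJoin_append_singleton [' '] (vs ++ [w]) _ (by simp)]
                simp
              simp [pvStep, pvView, pvWordsOf, hsp, hws, hj, List.append_assoc]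
      rw [List.foldl_cons, hstep]
      unfold PySem.Chars.split₀.go
      rcases cur with _ | ⟨d, ds⟩
      · simpa [hsp] using ih [c] acc
      · simpa [hsp] using ih (c :: d :: ds) acc

-- per-author agreement: the streaming scan formats exactly as A's split-based code, for any name
theorem pvFone_eq_ieee (name : String) :
    (let parts := PySem.Str.split₀ name
     if parts.length > 1 then
       String.ofList [(PySem.Str.pyGet? (PySem.List.pyGetD parts 0 "") 0).getD ' '] ++ ". " ++
         PySem.Str.join " " (PySem.List.slice parts (some 1) none)
     else if name ≠ "" then name else "Unknown")
    = pvIeee name := by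
  obtain ⟨b, hb⟩ := pvScan_go name.toList [] []
  have h0 : pvView (pvWordsOf [] []) (List.isEmpty ([] : List Char))
      = (([], none, 0, true) : List Char × Option Char × Nat × Bool) := rfl
  rw [h0] at hb
  have hW : PySem.Chars.split₀.go name.toList [] [] = PySem.Chars.split₀ name.toList := rfl
  rw [hW] at hb
  have hS : PySem.Str.split₀ name = (PySem.Chars.split₀ name.toList).map String.ofList := rfl
  unfold pvIeee
  rw [hb, hS]
  rcases hsp : PySem.Chars.split₀ name.toList with _ | ⟨w1, _ | ⟨w2, ws⟩⟩
  · simp [pvView]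
  · simp [pvView, PySem.Chars.join, List.intercalate]
  · have hmap : List.map (String.toList ∘ String.ofList) ws = ws := by
      simp [Function.comp_def]
    have hof : ∀ (a c : List Char), String.ofList a ++ ". " ++ String.ofList c
        = String.ofList (a ++ '.' :: ' ' :: c) := by
      intro a c
      rw [show (". " : String) = String.ofList ['.', ' '] from rfl,
        ← String.ofList_append, ← String.ofList_append]
      simp
    have hget : PySem.List.pyGet? w1 (0 : Int) = w1.head? := by
      rcases w1 with _ | ⟨x, xs⟩ <;> simp [PySem.List.pyGet?, PySem.List.pyIdx?]
    simp only [pvView, List.length_map, List.length_cons, List.tail_cons, List.head?_cons,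
      Option.bind_some]
    rw [if_pos (by omega : ws.length + 1 + 1 > 1), if_pos (by omega : ws.length + 1 + 1 > 1)]
    have hgd : PySem.List.pyGetD (List.map String.ofList (w1 :: w2 :: ws)) 0 ""
        = String.ofList w1 := by simp [PySem.List.pyGetD_zero_cons]
    have hpg : PySem.Str.pyGet? (String.ofList w1) 0 = w1.head? := by
      rw [show ((0 : Int)) = ((0 : Nat) : Int) from rfl]
      rw [PySem.Str.pyGet?_natCast]
      rcases w1 with _ | ⟨x, xs⟩ <;> simp
    have hj : PySem.Str.join " " (PySem.List.slice (List.map String.ofList (w1 :: w2 :: ws)) (some 1) none)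
        = String.ofList (PySem.Chars.join [' '] (w2 :: ws)) := by
      rw [PySem.List.slice_from_one]
      simp only [List.map_cons, List.tail_cons, PySem.Str.join, List.map_map, hmap]
      simp
    rw [hgd, hpg, hj, hof]

theorem pvF_eq_ieee (auth : List (String × List (String × String))) :
    pvF auth = pvIeee (pvName auth) := pvFone_eq_ieee (pvName auth)

theorem pvJoin_one (x : String) : PySem.Str.join " and " [x] = x := by
  simp [PySem.Str.join, PySem.Chars.join, List.intercalate]

theorem pvJoin_two (x y : String) : PySem.Str.join " and " [x, y] = x ++ " and " ++ y := by
  simp [PySem.Str.join, PySem.Chars.join, List.intercalate]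
  rw [String.append_assoc]
  congr 1
  rw [show (" and " : String) = String.ofList [' ', 'a', 'n', 'd', ' '] from rfl]
  conv_rhs => rw [← (String.ofList_toList : String.ofList y.toList = y)]
  rw [← String.ofList_append]
  simp

theorem format_openalex_authors_spec : Claim_equal_format_openalex_authors := by
  intro authorships _
  unfold Spec_format_openalex_authors format_openalex_authors format_openalex_authors_alt
  rcases authorships with _ | ⟨a, _ | ⟨b, _ | ⟨c, t⟩⟩⟩
  · rfl
  · rw [if_neg (by simp), pvFoldl_eq]
    simp [pvF_eq_ieee, PySem.List.pyGetD_zero_cons, pvJoin_one]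
  · rw [if_neg (by simp), pvFoldl_eq]
    simp [pvF_eq_ieee, PySem.List.pyGetD, pvJoin_two]
  · rw [if_neg (by simp), pvFoldl_eq]
    simp [pvF_eq_ieee, PySem.List.pyGetD_zero_cons]
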